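-- pv_equiv track=rewrite | github.com/huboqiang/omnialigner | src/omnialigner/integration/adata_merge.py | find_p123_positions
-- ===== SOURCE A (Python) =====
-- def find_p123_positions(lst, anchor="HE"):
--     result = []
--     anchor_pos = []
--     for i, val in enumerate(lst):
--         if val == anchor:
--             anchor_pos.append(i)
--             pos_p1 = None
--             pos_p2 = None
--             pos_p3 = None
--             dist = 1
--             while None in [pos_p1, pos_p2, pos_p3]:
--                 right = i + dist
--                 if right < len(lst):
--                     if lst[right] == "P1" and pos_p1 is None:
--                         pos_p1 = right
--                     elif lst[right] == "P2" and pos_p2 is None: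
--                         pos_p2 = right
--                     elif lst[right] == "P3" and pos_p3 is None:
--                         pos_p3 = right
--
--                 left = i - dist
--                 if left >= 0:
--                     if lst[left] == "P1" and pos_p1 is None:
--                         pos_p1 = left
--                     elif lst[left] == "P2" and pos_p2 is None:
--                         pos_p2 = left
--                     elif lst[left] == "P3" and pos_p3 is None:
--                         pos_p3 = left
--
--                 dist += 1
--
--             result.append([pos_p1, pos_p2, pos_p3])
--
--     return result, anchor_pos
-- ===== SOURCE B (Python) =====
-- def find_p123_positions(lst, anchor="HE"):
--     anchor_pos = [i for i, v in enumerate(lst) if v == anchor]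
--
--     def positions(lab):
--         return [i for i, v in enumerate(lst) if v == lab]
--
--     p1, p2, p3 = positions("P1"), positions("P2"), positions("P3")
--
--     def nearest(i, ps):
--         # smallest distance wins; on a distance tie the right neighbour wins
--         # (the left side pays the +1 penalty in the doubled-distance key)
--         return min((j for j in ps if j != i),
--                    key=lambda j: 2 * abs(i - j) + (j < i))
--
--     result = [[nearest(i, p1), nearest(i, p2), nearest(i, p3)] for i in anchor_pos]
--     return result, anchor_pos
-- ===== Notes on version B (the rewrite author's own statement) =====
-- stated objective: alternative
-- what changed: A runs an expanding-ring scan (dist = 1, 2, ...) around each anchor until all three labels are seen; B precomputes the index list of each label once and picks, per anchor, the argmin of a doubled-distance key (left side +1, so the right neighbour wins distance ties).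
-- outside the precondition, e.g. on find_p123_positions(['HE', 'P1'], 'HE'): A does not finish within the time limit, B raises ValueError
import Mathlib
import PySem

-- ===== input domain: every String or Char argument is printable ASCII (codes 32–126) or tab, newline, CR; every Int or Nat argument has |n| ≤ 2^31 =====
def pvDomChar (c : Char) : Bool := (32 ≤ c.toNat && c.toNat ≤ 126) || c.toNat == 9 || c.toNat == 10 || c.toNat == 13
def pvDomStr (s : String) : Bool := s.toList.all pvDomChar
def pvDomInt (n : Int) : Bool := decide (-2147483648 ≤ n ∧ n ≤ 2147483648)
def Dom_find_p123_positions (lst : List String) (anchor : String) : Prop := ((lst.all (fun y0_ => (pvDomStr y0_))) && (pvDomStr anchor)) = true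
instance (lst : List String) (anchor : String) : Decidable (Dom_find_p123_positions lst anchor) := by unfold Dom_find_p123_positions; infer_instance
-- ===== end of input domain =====

-- B replaces A's per-anchor expanding-ring scan by per-label position lists and an
-- argmin over each list with a doubled-distance key (left side +1, so right wins ties).

-- ===== PORT A =====
-- one visit of Python's inner if/elif chain at index `pos`, guarded by `ok` (the range test)
def pvVisit (lst : List String) (ok : Bool) (pos : Int)
    (s : Option Int × Option Int × Option Int) : Option Int × Option Int × Option Int :=
  if ok then
    if PySem.List.pyGetD lst pos "" = "P1" ∧ s.1 = none then (some pos, s.2.1, s.2.2)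
    else if PySem.List.pyGetD lst pos "" = "P2" ∧ s.2.1 = none then (s.1, some pos, s.2.2)
    else if PySem.List.pyGetD lst pos "" = "P3" ∧ s.2.2 = none then (s.1, s.2.1, some pos)
    else s
  else s

-- Python's `while None in [pos_p1, pos_p2, pos_p3]` loop; `fuel` only bounds the
-- recursion: under Pre_ the loop exits via the all-found test before fuel runs out
-- (on inputs outside Pre_ the Python loop never terminates).
def pvRing (lst : List String) (i : Int) (dist : Nat)
    (s : Option Int × Option Int × Option Int) (fuel : Nat) :
    Option Int × Option Int × Option Int :=
  match fuel with
  | 0 => s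
  | fuel + 1 =>
    if s.1 = none ∨ s.2.1 = none ∨ s.2.2 = none then
      let right : Int := i + dist
      let s1 := pvVisit lst (decide (right < (lst.length : Int))) right s
      let left : Int := i - dist
      let s2 := pvVisit lst (decide (0 ≤ left)) left s1
      pvRing lst i (dist + 1) s2 fuel
    else s

def find_p123_positions (lst : List String) (anchor : String) : List (List Int) × List Int :=
  (PySem.List.enumerate lst 0).foldl
    (fun acc p =>
      if p.2 = anchor then
        let r := pvRing lst p.1 1 (none, none, none) lst.length
        -- under Pre_ all three slots are `some`; `.getD 0` is never the default there
        (acc.1 ++ [[r.1.getD 0, r.2.1.getD 0, r.2.2.getD 0]], acc.2 ++ [p.1])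
      else acc)
    ([], [])

-- ===== PORT B =====
def pvPositions (lst : List String) (lab : String) : List Int :=
  ((PySem.List.enumerate lst 0).filter (fun p => p.2 == lab)).map (fun p => p.1)

-- doubled distance, +1 for the left side: smallest distance wins, right wins a tie
def pvKey (i j : Int) : Int := 2 * ((i - j).natAbs : Int) + (if j < i then 1 else 0)

-- min() of an empty candidate sequence raises ValueError in Python; Pre_ excludes that,
-- so `.getD 0` is never the default inside Pre_.
def pvNearest (i : Int) (ps : List Int) : Int :=
  (PySem.List.min? (ps.filter (fun j => j != i)) (fun j => pvKey i j)).getD 0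

def find_p123_positions_alt (lst : List String) (anchor : String) : List (List Int) × List Int :=
  let anchor_pos := ((PySem.List.enumerate lst 0).filter (fun p => p.2 == anchor)).map (fun p => p.1)
  let p1 := pvPositions lst "P1"
  let p2 := pvPositions lst "P2"
  let p3 := pvPositions lst "P3"
  (anchor_pos.map (fun i => [pvNearest i p1, pvNearest i p2, pvNearest i p3]), anchor_pos)

-- ===== PRECONDITION & SPEC =====
-- Pre_ admits exactly the inputs on which Python A terminates: every anchor occurrence
-- must have each of "P1","P2","P3" at some OTHER index; otherwise A's while loop never ends.
def Pre_find_p123_positions (lst : List String) (anchor : String) : Prop :=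
  ∀ p ∈ PySem.List.enumerate lst 0, p.2 = anchor →
    ∀ lab ∈ ["P1", "P2", "P3"], ∃ q ∈ PySem.List.enumerate lst 0, q.1 ≠ p.1 ∧ q.2 = lab
instance (lst : List String) (anchor : String) : Decidable (Pre_find_p123_positions lst anchor) := by
  unfold Pre_find_p123_positions; infer_instance

def pvWitness_find_p123_positions : List String × String :=
  (["P2", "HE", "P1", "X", "P3", "HE"], "HE")

def Spec_find_p123_positions (lst : List String) (anchor : String) (out : List (List Int) × List Int) : Prop := out = find_p123_positions_alt lst anchor
instance (lst : List String) (anchor : String) (out : List (List Int) × List Int) : Decidable (Spec_find_p123_positions lst anchor out) := by unfold Spec_find_p123_positions; infer_instance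

-- ===== CLAIM (what is proved, stated in full; the proofs are below) =====
def Claim_equal_find_p123_positions : Prop := ∀ (lst : List String) (anchor : String), Dom_find_p123_positions lst anchor → Pre_find_p123_positions lst anchor → Spec_find_p123_positions lst anchor (find_p123_positions lst anchor)

-- ===== LEMMAS AND PROOFS =====

-- the candidate list B minimizes over, for label `lab` and anchor index `i`
def pvCand (lst : List String) (lab : String) (i : Int) : List Int :=
  (pvPositions lst lab).filter (fun j => j != i)

lemma mem_pvCand {lst : List String} {lab : String} {i j : Int} :
    j ∈ pvCand lst lab i ↔
      0 ≤ j ∧ j < (lst.length : Int) ∧ PySem.List.pyGetD lst j "" = lab ∧ j ≠ i := by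
  simp only [pvCand, pvPositions, List.mem_filter, List.mem_map, PySem.List.mem_enumerate_iff]
  constructor
  · rintro ⟨⟨p, ⟨⟨k, hk, rfl⟩, hlab⟩, rfl⟩, hne⟩
    simp only [beq_iff_eq] at hlab hne
    refine ⟨by omega, by omega, ?_, by simpa using hne⟩
    rw [show ((0:Int) + k) = (k:Int) by omega, PySem.List.pyGetD_natCast]
    simp [List.getD, hk, hlab]
  · rintro ⟨h0, h1, hlab, hne⟩
    refine ⟨⟨(j, lst[j.toNat]'(by omega)), ⟨⟨j.toNat, by omega, by simp; omega⟩, ?_⟩, rfl⟩, by simpa using hne⟩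
    simp only [beq_iff_eq]
    rw [PySem.List.pyGetD_eq_getElem lst "" h0 h1] at hlab
    exact hlab

lemma pvKey_inj {i j j' : Int} (h : pvKey i j = pvKey i j') : j = j' := by
  simp only [pvKey] at h; split_ifs at h <;> omega

-- one component of one `pvVisit`
def pvUpd (lst : List String) (ok : Bool) (pos : Int) (lab : String) (o : Option Int) : Option Int :=
  if ok ∧ PySem.List.pyGetD lst pos "" = lab ∧ o = none then some pos else o

lemma visit_char (lst : List String) (ok : Bool) (pos : Int) (s : Option Int × Option Int × Option Int) :
    pvVisit lst ok pos s =
      (pvUpd lst ok pos "P1" s.1, pvUpd lst ok pos "P2" s.2.1, pvUpd lst ok pos "P3" s.2.2) := by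
  obtain ⟨o1, o2, o3⟩ := s
  simp only [pvVisit, pvUpd]
  rcases ok with _ | _
  · simp
  · split_ifs <;> simp_all

-- one-label description of the two chained visits of one iteration
def pvStepOne (lst : List String) (lab : String) (i : Int) (d : Nat) (o : Option Int) : Option Int :=
  match o with
  | some j => some j
  | none =>
    if i + d < (lst.length : Int) ∧ PySem.List.pyGetD lst (i + d) "" = lab then some (i + d)
    else if 0 ≤ i - d ∧ PySem.List.pyGetD lst (i - d) "" = lab then some (i - d)
    else none

lemma upd2_eq_stepOne (lst : List String) (lab : String) (i : Int) (d : Nat) (o : Option Int) :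
    pvUpd lst (decide (0 ≤ i - d)) (i - d) lab
      (pvUpd lst (decide (i + d < (lst.length : Int))) (i + d) lab o) = pvStepOne lst lab i d o := by
  rcases o with _ | j
  · simp only [pvUpd, pvStepOne]
    split_ifs <;> simp_all
    omega
  · simp [pvUpd, pvStepOne]

lemma visit2_char (lst : List String) (i : Int) (d : Nat)
    (s : Option Int × Option Int × Option Int) :
    pvVisit lst (decide (0 ≤ i - d)) (i - d)
        (pvVisit lst (decide (i + d < (lst.length : Int))) (i + d) s) =
      (pvStepOne lst "P1" i d s.1, pvStepOne lst "P2" i d s.2.1, pvStepOne lst "P3" i d s.2.2) := by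
  rw [visit_char, visit_char]
  simp only [upd2_eq_stepOne]

-- the loop invariant for one label's slot, entering the iteration with `dist = d`
def pvInv (lst : List String) (lab : String) (i : Int) (d : Nat) (o : Option Int) : Prop :=
  (o = none → ∀ j ∈ pvCand lst lab i, (d : Int) ≤ ((i - j).natAbs : Int)) ∧
  (∀ j, o = some j → j ∈ pvCand lst lab i ∧ ∀ j' ∈ pvCand lst lab i, pvKey i j ≤ pvKey i j')

lemma stepOne_inv {lst : List String} {lab : String} {i : Int} {d : Nat} {o : Option Int}
    (hi0 : 0 ≤ i) (hilen : i < (lst.length : Int)) (hd : 1 ≤ d) (h : pvInv lst lab i d o) :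
    pvInv lst lab i (d + 1) (pvStepOne lst lab i d o) := by
  obtain ⟨hnone, hsome⟩ := h
  rcases o with _ | j
  · simp only [pvStepOne]
    split_ifs with hR hL
    · -- found on the right
      refine ⟨by simp, ?_⟩
      rintro j hj
      cases hj
      have hmem : (i + (d:Int)) ∈ pvCand lst lab i := by
        rw [mem_pvCand]; exact ⟨by omega, hR.1, hR.2, by omega⟩
      refine ⟨hmem, ?_⟩
      intro j' hj'
      have := hnone rfl j' hj'
      simp only [pvKey]
      split_ifs <;> omega
    · -- found on the left
      refine ⟨by simp, ?_⟩
      rintro j hj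
      cases hj
      have hmem : (i - (d:Int)) ∈ pvCand lst lab i := by
        rw [mem_pvCand]; exact ⟨hL.1, by omega, hL.2, by omega⟩
      refine ⟨hmem, ?_⟩
      intro j' hj'
      have hge := hnone rfl j' hj'
      -- if j' is at distance exactly d it must be the left one (the right visit failed)
      by_cases hdist : ((i - j').natAbs : Int) = (d : Int)
      · have hj'mem := (mem_pvCand).1 hj'
        have : j' = i - d ∨ j' = i + d := by omega
        rcases this with rfl | rfl
        · simp [pvKey]
        · exact absurd hj'mem.2.2.1 (fun hb => hR ⟨hj'mem.2.1, hb⟩)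
      · simp only [pvKey]; split_ifs <;> omega
    · -- not found at distance d
      refine ⟨?_, by simp⟩
      intro _ j hj
      have hge := hnone rfl j hj
      have hjmem := (mem_pvCand).1 hj
      by_cases hdist : ((i - j).natAbs : Int) = (d : Int)
      · have : j = i - d ∨ j = i + d := by omega
        rcases this with rfl | rfl
        · exact absurd hjmem.2.2.1 (fun hb => hL ⟨hjmem.1, hb⟩)
        · exact absurd hjmem.2.2.1 (fun hb => hR ⟨hjmem.2.1, hb⟩)
      · omega
  · exact ⟨by simp [pvStepOne], by
      rintro j' hj'
      simp only [pvStepOne] at hj'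
      cases hj'
      exact hsome j rfl⟩

lemma inv_some_eq {lst : List String} {lab : String} {i : Int} {d : Nat} {j : Int}
    (h : pvInv lst lab i d (some j)) :
    j = pvNearest i (pvPositions lst lab) := by
  obtain ⟨hjmem, hjmin⟩ := h.2 j rfl
  have hne : pvCand lst lab i ≠ [] := fun hnil => by simp [hnil] at hjmem
  obtain ⟨m, hm⟩ : ∃ m, PySem.List.min? (pvCand lst lab i) (fun j => pvKey i j) = some m := by
    rcases hmo : PySem.List.min? (pvCand lst lab i) (fun j => pvKey i j) with _ | m
    · exact absurd ((PySem.List.min?_eq_none_iff _ _).1 hmo) hne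
    · exact ⟨m, rfl⟩
  have hmmem := PySem.List.min?_mem hm
  have hmmin := PySem.List.min?_isMin hm
  have h1 : pvKey i j ≤ pvKey i m := hjmin m hmmem
  have h2 : pvKey i m ≤ pvKey i j := hmmin j hjmem
  have : j = m := pvKey_inj (le_antisymm h1 h2)
  have hfold : (pvPositions lst lab).filter (fun j => j != i) = pvCand lst lab i := rfl
  rw [pvNearest, hfold, hm]
  simpa using this

lemma inv_none_absurd {lst : List String} {lab : String} {i : Int} {d : Nat}
    (hi0 : 0 ≤ i) (hilen : i < (lst.length : Int))
    (hne : pvCand lst lab i ≠ [])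
    (hlen : lst.length < d) (h : pvInv lst lab i d none) : False := by
  obtain ⟨j, hj⟩ := List.exists_mem_of_ne_nil _ hne
  have := h.1 rfl j hj
  have hjmem := (mem_pvCand).1 hj
  omega

lemma ring_main {lst : List String} {i : Int}
    (hi0 : 0 ≤ i) (hilen : i < (lst.length : Int))
    (h1 : pvCand lst "P1" i ≠ []) (h2 : pvCand lst "P2" i ≠ []) (h3 : pvCand lst "P3" i ≠ []) :
    ∀ (fuel d : Nat) (o1 o2 o3 : Option Int), 1 ≤ d → lst.length < d + fuel →
      pvInv lst "P1" i d o1 → pvInv lst "P2" i d o2 → pvInv lst "P3" i d o3 →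
      pvRing lst i d (o1, o2, o3) fuel =
        (some (pvNearest i (pvPositions lst "P1")),
         some (pvNearest i (pvPositions lst "P2")),
         some (pvNearest i (pvPositions lst "P3"))) := by
  intro fuel
  induction fuel with
  | zero =>
    intro d o1 o2 o3 hd hlen hI1 hI2 hI3
    rcases o1 with _ | j1
    · exact absurd (inv_none_absurd hi0 hilen h1 (by omega) hI1) (by simp)
    rcases o2 with _ | j2
    · exact absurd (inv_none_absurd hi0 hilen h2 (by omega) hI2) (by simp)
    rcases o3 with _ | j3
    · exact absurd (inv_none_absurd hi0 hilen h3 (by omega) hI3) (by simp)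
    simp only [pvRing]
    rw [← inv_some_eq hI1, ← inv_some_eq hI2, ← inv_some_eq hI3]
  | succ fuel ih =>
    intro d o1 o2 o3 hd hlen hI1 hI2 hI3
    simp only [pvRing]
    by_cases hc : o1 = none ∨ o2 = none ∨ o3 = none
    · simp only [hc, if_pos]
      rw [visit2_char lst i d (o1, o2, o3)]
      exact ih (d + 1) _ _ _ (by omega) (by omega)
        (stepOne_inv hi0 hilen hd hI1) (stepOne_inv hi0 hilen hd hI2) (stepOne_inv hi0 hilen hd hI3)
    · simp only [if_neg hc]
      push Not at hc
      obtain ⟨j1, rfl⟩ := Option.ne_none_iff_exists'.1 hc.1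
      obtain ⟨j2, rfl⟩ := Option.ne_none_iff_exists'.1 hc.2.1
      obtain ⟨j3, rfl⟩ := Option.ne_none_iff_exists'.1 hc.2.2
      rw [← inv_some_eq hI1, ← inv_some_eq hI2, ← inv_some_eq hI3]

lemma cand_ne_of_pre {lst : List String} {anchor lab : String} {p : Int × String}
    (hpre : Pre_find_p123_positions lst anchor)
    (hp : p ∈ PySem.List.enumerate lst 0) (hpa : p.2 = anchor)
    (hlab : lab ∈ ["P1", "P2", "P3"]) : pvCand lst lab p.1 ≠ [] := by
  obtain ⟨q, hq, hqne, hqlab⟩ := hpre p hp hpa lab hlab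
  have hmem : q.1 ∈ pvCand lst lab p.1 := by
    rw [mem_pvCand]
    obtain ⟨k, hk, rfl⟩ := (PySem.List.mem_enumerate_iff _ _ _).1 hq
    simp only at hqlab hqne ⊢
    refine ⟨by omega, by omega, ?_, by simpa using hqne⟩
    rw [show ((0:Int) + k) = (k:Int) by omega, PySem.List.pyGetD_natCast]
    simp only [List.getD_eq_getElem?_getD, List.getElem?_eq_getElem hk, Option.getD_some]
    exact hqlab
  exact List.ne_nil_of_mem hmem

lemma ring_triple {lst : List String} {anchor : String} {p : Int × String}
    (hpre : Pre_find_p123_positions lst anchor)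
    (hp : p ∈ PySem.List.enumerate lst 0) (hpa : p.2 = anchor) :
    pvRing lst p.1 1 (none, none, none) lst.length =
      (some (pvNearest p.1 (pvPositions lst "P1")),
       some (pvNearest p.1 (pvPositions lst "P2")),
       some (pvNearest p.1 (pvPositions lst "P3"))) := by
  have hrange : 0 ≤ p.1 ∧ p.1 < (lst.length : Int) := by
    obtain ⟨k, hk, rfl⟩ := (PySem.List.mem_enumerate_iff _ _ _).1 hp
    constructor <;> simp
    omega
  have hinv : ∀ lab, pvInv lst lab p.1 1 none := by
    intro lab
    constructor
    · intro _ j hj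
      have := (mem_pvCand).1 hj
      omega
    · intro j h; cases h
  exact ring_main hrange.1 hrange.2
    (cand_ne_of_pre hpre hp hpa (by simp))
    (cand_ne_of_pre hpre hp hpa (by simp))
    (cand_ne_of_pre hpre hp hpa (by simp))
    lst.length 1 none none none (by omega) (by omega) (hinv _) (hinv _) (hinv _)

lemma foldA {lst : List String} {anchor : String}
    (l : List (Int × String))
    (H : ∀ p ∈ l, p.2 = anchor →
      pvRing lst p.1 1 (none, none, none) lst.length =
        (some (pvNearest p.1 (pvPositions lst "P1")),
         some (pvNearest p.1 (pvPositions lst "P2")),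
         some (pvNearest p.1 (pvPositions lst "P3")))) :
    ∀ (acc : List (List Int) × List Int),
      l.foldl (fun acc p =>
        if p.2 = anchor then
          let r := pvRing lst p.1 1 (none, none, none) lst.length
          (acc.1 ++ [[r.1.getD 0, r.2.1.getD 0, r.2.2.getD 0]], acc.2 ++ [p.1])
        else acc) acc =
      (acc.1 ++ (l.filter (fun p => p.2 == anchor)).map
          (fun p => [pvNearest p.1 (pvPositions lst "P1"),
                     pvNearest p.1 (pvPositions lst "P2"),
                     pvNearest p.1 (pvPositions lst "P3")]),
       acc.2 ++ (l.filter (fun p => p.2 == anchor)).map (fun p => p.1)) := by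
  induction l with
  | nil => intro acc; simp
  | cons p l ih =>
    intro acc
    have ihl := ih (fun q hq => H q (List.mem_cons_of_mem _ hq))
    by_cases hpa : p.2 = anchor
    · rw [List.foldl_cons, if_pos hpa, H p List.mem_cons_self hpa]
      rw [ihl]
      simp [hpa]
    · rw [List.foldl_cons, if_neg hpa, ihl]
      simp only [List.filter_cons]
      have : (p.2 == anchor) = false := by simpa using hpa
      simp [this]

-- ===== VERDICT (by name: the statement is the Claim_ definition above) =====
theorem find_p123_positions_spec : Claim_equal_find_p123_positions := by
  intro lst anchor _ hpre
  show find_p123_positions lst anchor = find_p123_positions_alt lst anchor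
  rw [find_p123_positions, find_p123_positions_alt]
  rw [foldA (PySem.List.enumerate lst 0) (fun p hp hpa => ring_triple hpre hp hpa) ([], [])]
  simp [List.map_map, Function.comp]
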